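-- pv_equiv track=rewrite | github.com/qiumuyang/xiaoxiao | src/utils/render/objects/waterfall/utils.py | _approx_unordered
-- ===== SOURCE A (Python) =====
-- from heapq import heappop, heappush
--
-- def _approx_unordered(arr, k):
--     indexed_nums = sorted(enumerate(arr), key=lambda x: -x[1])
--     sublists = [[] for _ in range(k)]
--     heap = [(0, i) for i in range(k)]
--
--     for index, num in indexed_nums:
--         current_sum, sublist_index = heappop(heap)
--         sublists[sublist_index].append(index)
--         heappush(heap, (current_sum + num, sublist_index))
--
--     return sublists
-- ===== SOURCE B (Python) =====
-- def _approx_unordered(arr, k):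
--     indexed_nums = sorted(enumerate(arr), key=lambda x: -x[1])
--     sublists = [[] for _ in range(k)]
--     sums = [0] * k
--     for index, num in indexed_nums:
--         j = min(range(k), key=lambda i: (sums[i], i))
--         sublists[j].append(index)
--         sums[j] += num
--     return sublists
-- ===== Notes on version B (the rewrite author's own statement) =====
-- stated objective: simpler
-- what changed: Replaces the binary heap (heappop/heappush) by a plain list of k running sums with a linear argmin scan keyed (sums[i], i), which reproduces the heap's lexicographic tie-breaking.
import Mathlib
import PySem

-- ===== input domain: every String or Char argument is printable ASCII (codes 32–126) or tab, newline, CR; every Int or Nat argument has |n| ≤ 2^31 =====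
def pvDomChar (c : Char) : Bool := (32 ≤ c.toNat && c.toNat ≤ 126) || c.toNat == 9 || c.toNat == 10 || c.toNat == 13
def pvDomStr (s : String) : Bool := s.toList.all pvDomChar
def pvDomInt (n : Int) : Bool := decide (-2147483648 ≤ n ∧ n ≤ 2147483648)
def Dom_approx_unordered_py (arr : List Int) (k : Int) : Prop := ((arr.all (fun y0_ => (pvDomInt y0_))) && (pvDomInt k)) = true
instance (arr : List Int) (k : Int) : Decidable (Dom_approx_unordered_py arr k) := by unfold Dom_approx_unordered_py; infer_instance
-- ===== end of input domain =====

-- B replaces A's binary heap by k running sums with a linear argmin scan keyed (sum, index): simpler, same results.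

-- ===== PORT A =====

-- Python tuple comparison (a1, a2) < (b1, b2), lexicographic
def pvLt (a b : Int × Int) : Bool := a.1 < b.1 || (a.1 == b.1 && a.2 < b.2)

-- heapq._siftdown(heap, startpos, pos); newitem = heap[pos] is read once at entry
def pvSiftdownLoop (heap : List (Int × Int)) (startpos pos : Nat) (newitem : Int × Int) :
    List (Int × Int) :=
  if _h : startpos < pos then
    let parentpos := (pos - 1) / 2
    let parent := heap[parentpos]!
    if pvLt newitem parent then
      pvSiftdownLoop (heap.set pos parent) startpos parentpos newitem
    else heap.set pos newitem
  else heap.set pos newitem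
termination_by pos
decreasing_by omega

def pvSiftdown (heap : List (Int × Int)) (startpos pos : Nat) : List (Int × Int) :=
  pvSiftdownLoop heap startpos pos (heap[pos]!)

-- the while-loop of heapq._siftup: move the hole down a level, following the smaller child
def pvSiftupLoop (heap : List (Int × Int)) (pos endpos : Nat) : List (Int × Int) × Nat :=
  if _h : 2 * pos + 1 < endpos then
    let childpos := 2 * pos + 1
    let rightpos := childpos + 1
    if rightpos < endpos && !(pvLt (heap[childpos]!) (heap[rightpos]!)) then
      pvSiftupLoop (heap.set pos (heap[rightpos]!)) rightpos endpos
    else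
      pvSiftupLoop (heap.set pos (heap[childpos]!)) childpos endpos
  else (heap, pos)
termination_by endpos - pos
decreasing_by all_goals omega

-- heapq._siftup(heap, pos)
def pvSiftup (heap : List (Int × Int)) (pos : Nat) : List (Int × Int) :=
  let endpos := heap.length
  let startpos := pos
  let newitem := heap[pos]!
  let hp := pvSiftupLoop heap pos endpos
  pvSiftdownLoop (hp.1.set hp.2 newitem) startpos hp.2 newitem

-- heapq.heappop; raises IndexError on an empty heap (those inputs are outside Pre_)
def pvHeappop (heap : List (Int × Int)) : (Int × Int) × List (Int × Int) :=
  let lastelt := heap.getLast!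
  let rest := heap.dropLast
  if rest.isEmpty then (lastelt, rest)
  else (rest[0]!, pvSiftup (rest.set 0 lastelt) 0)

-- heapq.heappush
def pvHeappush (heap : List (Int × Int)) (item : Int × Int) : List (Int × Int) :=
  pvSiftdown (heap ++ [item]) 0 ((heap ++ [item]).length - 1)

-- body of A's for-loop
def pvStepA (st : List (List Int) × List (Int × Int)) (p : Int × Int) :
    List (List Int) × List (Int × Int) :=
  let popped := pvHeappop st.2
  let cs := popped.1
  let sublists := PySem.List.pySetD st.1 cs.2 (PySem.List.pyGetD st.1 cs.2 [] ++ [p.1])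
  (sublists, pvHeappush popped.2 (cs.1 + p.2, cs.2))

def approx_unordered_py (arr : List Int) (k : Int) : List (List Int) :=
  let indexed_nums := PySem.List.sorted (PySem.List.enumerate arr) (fun x => -x.2)
  let sublists := (PySem.List.pyRange 0 k 1).map (fun _ => ([] : List Int))
  let heap := (PySem.List.pyRange 0 k 1).map (fun i => ((0 : Int), i))
  (indexed_nums.foldl pvStepA (sublists, heap)).1

-- ===== PORT B =====

-- body of B's for-loop: j = min(range(k), key=lambda i: (sums[i], i));
-- min on an empty range raises ValueError in Python (those inputs are outside Pre_)
def pvStepB (k : Int) (st : List (List Int) × List Int) (p : Int × Int) :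
    List (List Int) × List Int :=
  let j := (PySem.List.min2? (PySem.List.pyRange 0 k 1)
      (fun i => PySem.List.pyGetD st.2 i 0) (fun i => i)).getD 0
  (PySem.List.pySetD st.1 j (PySem.List.pyGetD st.1 j [] ++ [p.1]),
   PySem.List.pySetD st.2 j (PySem.List.pyGetD st.2 j 0 + p.2))

def approx_unordered_py_alt (arr : List Int) (k : Int) : List (List Int) :=
  let indexed_nums := PySem.List.sorted (PySem.List.enumerate arr) (fun x => -x.2)
  let sublists := (PySem.List.pyRange 0 k 1).map (fun _ => ([] : List Int))
  let sums := List.replicate k.toNat (0 : Int)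
  (indexed_nums.foldl (pvStepB k) (sublists, sums)).1

-- ===== PRECONDITION & SPEC =====
-- Pre_ excludes exactly the inputs on which the Python programs raise (A: IndexError popping
-- an empty heap; B: ValueError taking min of an empty range): a nonempty arr with k ≤ 0.
def Pre_approx_unordered_py (arr : List Int) (k : Int) : Prop := arr = [] ∨ 1 ≤ k
instance (arr : List Int) (k : Int) : Decidable (Pre_approx_unordered_py arr k) := by
  unfold Pre_approx_unordered_py; infer_instance

def pvWitness_approx_unordered_py : List Int × Int := ([3, 1, 2], 2)

def Spec_approx_unordered_py (arr : List Int) (k : Int) (out : List (List Int)) : Prop :=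
  out = approx_unordered_py_alt arr k
instance (arr : List Int) (k : Int) (out : List (List Int)) :
    Decidable (Spec_approx_unordered_py arr k out) := by
  unfold Spec_approx_unordered_py; infer_instance

-- ===== CLAIM (what is proved, stated in full; the proofs are below) =====
def Claim_equal_approx_unordered_py : Prop := ∀ (arr : List Int) (k : Int), Dom_approx_unordered_py arr k → Pre_approx_unordered_py arr k → Spec_approx_unordered_py arr k (approx_unordered_py arr k)

-- ===== LEMMAS AND PROOFS =====

-- the lexicographic order on pairs, as a proposition
def LexLe (a b : Int × Int) : Prop := a.1 < b.1 ∨ (a.1 = b.1 ∧ a.2 ≤ b.2)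

theorem pvLt_true_iff (a b : Int × Int) :
    pvLt a b = true ↔ (a.1 < b.1 ∨ (a.1 = b.1 ∧ a.2 < b.2)) := by
  simp [pvLt]

theorem pvLt_false_iff (a b : Int × Int) : pvLt a b = false ↔ LexLe b a := by
  rw [Bool.eq_false_iff, Ne, pvLt_true_iff]; unfold LexLe; omega

theorem LexLe_refl (a : Int × Int) : LexLe a a := by unfold LexLe; omega

theorem LexLe_trans {a b c : Int × Int} (h1 : LexLe a b) (h2 : LexLe b c) : LexLe a c := by
  unfold LexLe at *; omega

theorem LexLe_antisymm {a b : Int × Int} (h1 : LexLe a b) (h2 : LexLe b a) : a = b := by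
  unfold LexLe at *
  obtain ⟨a1, a2⟩ := a; obtain ⟨b1, b2⟩ := b
  simp_all; omega

-- heap predicates, stated with `getElem!`
def IsHeap (l : List (Int × Int)) : Prop :=
  ∀ j : Nat, 0 < j → j < l.length → LexLe (l[(j - 1) / 2]!) (l[j]!)

def HeapExcept (l : List (Int × Int)) (p : Nat) : Prop :=
  ∀ j : Nat, 0 < j → j < l.length → (j - 1) / 2 ≠ p → j ≠ p → LexLe (l[(j - 1) / 2]!) (l[j]!)

def BelowOK (l : List (Int × Int)) (p : Nat) (ni : Int × Int) : Prop :=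
  ∀ c : Nat, 0 < c → c < l.length → (c - 1) / 2 = p →
    LexLe ni (l[c]!) ∧ (0 < p → LexLe (l[(p - 1) / 2]!) (l[c]!))

def ParentOK (l : List (Int × Int)) (p : Nat) : Prop :=
  ∀ c : Nat, 0 < c → c < l.length → (c - 1) / 2 = p →
    (0 < p → LexLe (l[(p - 1) / 2]!) (l[c]!))

-- getElem! on set
theorem getbang_set_self (l : List (Int × Int)) (p : Nat) (x : Int × Int) (h : p < l.length) :
    (l.set p x)[p]! = x := by
  rw [getElem!_pos _ _ (by simpa using h), List.getElem_set_self]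

theorem getbang_set_ne (l : List (Int × Int)) (p j : Nat) (x : Int × Int) (hne : p ≠ j)
    (hj : j < l.length) : (l.set p x)[j]! = l[j]! := by
  have hj' : j < (l.set p x).length := by simpa using hj
  rw [getElem!_pos (l.set p x) j hj', getElem!_pos l j hj, List.getElem_set_ne hne]

-- multisets: setting one cell swaps one element
theorem set_multiset (l : List (Int × Int)) (i : Nat) (x : Int × Int) (h : i < l.length) :
    (↑(l.set i x) : Multiset (Int × Int)) + {l[i]!} = ↑l + {x} := by
  induction l generalizing i with
  | nil => simp at h
  | cons a t ih =>
    cases i with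
    | zero =>
      rw [getElem!_pos (a :: t) 0 (by simp), List.getElem_cons_zero]
      show (↑(x :: t) : Multiset (Int × Int)) + {a} = ↑(a :: t) + {x}
      rw [add_comm, add_comm (↑(a :: t) : Multiset (Int × Int)) _, Multiset.singleton_add,
        Multiset.singleton_add, ← Multiset.cons_coe, ← Multiset.cons_coe, Multiset.cons_swap]
    | succ i =>
      have hi : i < t.length := by simpa using h
      rw [getElem!_pos (a :: t) (i + 1) (by simpa using h), List.getElem_cons_succ]
      show (↑(a :: t.set i x) : Multiset (Int × Int)) + {t[i]} = ↑(a :: t) + {x}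
      rw [← Multiset.cons_coe, ← Multiset.cons_coe, Multiset.cons_add, Multiset.cons_add,
        ← getElem!_pos t i hi]
      exact congrArg _ (ih i hi)

theorem siftdownLoop_multiset (p : Nat) (l : List (Int × Int)) (ni : Int × Int)
    (h : p < l.length) :
    (↑(pvSiftdownLoop l 0 p ni) : Multiset (Int × Int)) + {l[p]!} = ↑l + {ni} := by
  induction p using Nat.strong_induction_on generalizing l with
  | _ p ih =>
    rw [pvSiftdownLoop]
    by_cases h0 : 0 < p
    · simp only [dif_pos h0]
      set pp := (p - 1) / 2 with hpp
      by_cases hc : pvLt ni (l[pp]!) = true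
      · simp only [if_pos hc]
        have hpplt : pp < p := by omega
        have hpl : pp < (l.set p (l[pp]!)).length := by simp; omega
        have hrec := ih pp hpplt (l.set p (l[pp]!)) (by simpa using hpl)
        rw [getbang_set_ne l p pp (l[pp]!) (by omega) (by omega)] at hrec
        have hswap := set_multiset l p (l[pp]!) h
        -- combine: M(res) + {l[pp]!} = M(l.set p l[pp]!) + {ni}; M(l.set p l[pp]!) + {l[p]!} = M l + {l[pp]!}
        have := congrArg (fun m => m + {l[p]!}) hrec
        simp only at this
        rw [add_right_comm] at this
        rw [add_right_comm (↑(l.set p l[pp]!) : Multiset (Int × Int)) {ni} {l[p]!}, hswap,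
          add_right_comm (↑l : Multiset (Int × Int)) {l[pp]!} {ni}] at this
        exact add_right_cancel this
      · simp only [if_neg hc]
        exact set_multiset l p ni h
    · simp only [dif_neg h0]
      exact set_multiset l p ni h

theorem LexLe_of_lt {a b : Int × Int} (h : pvLt a b = true) : LexLe a b := by
  rw [pvLt_true_iff] at h; unfold LexLe; omega

theorem siftdownLoop_heap (p : Nat) (l : List (Int × Int)) (ni : Int × Int)
    (hp : p < l.length) (h1 : HeapExcept l p) (h2 : BelowOK l p ni) :
    IsHeap (pvSiftdownLoop l 0 p ni) := by
  induction p using Nat.strong_induction_on generalizing l with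
  | _ p ih =>
    rw [pvSiftdownLoop]
    by_cases h0 : 0 < p
    · simp only [dif_pos h0]
      set pp := (p - 1) / 2 with hpp
      by_cases hc : pvLt ni (l[pp]!) = true
      · simp only [if_pos hc]
        have hppp : pp < p := by omega
        have hppl : pp < l.length := by omega
        apply ih pp hppp (l.set p (l[pp]!)) (by simp; omega)
        · -- HeapExcept (l.set p l[pp]!) pp
          intro j hj0 hjlen hq hjne
          have hjl : j < l.length := by simpa using hjlen
          have hjp : j ≠ p := by omega
          rw [getbang_set_ne l p j _ (by omega) hjl]
          by_cases hqp : (j - 1) / 2 = p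
          · rw [hqp, getbang_set_self l p _ hp]
            exact (h2 j hj0 hjl hqp).2 h0
          · rw [getbang_set_ne l p ((j - 1) / 2) _ (by omega) (by omega)]
            exact h1 j hj0 hjl hqp hjp
        · -- BelowOK (l.set p l[pp]!) pp ni
          intro c hc0 hclen hcq
          have hcl : c < l.length := by simpa using hclen
          have hLpp : 0 < pp → LexLe (l[(pp - 1) / 2]!) (l[pp]!) := fun hpp0 =>
            h1 pp hpp0 hppl (by omega) (by omega)
          by_cases hcp : c = p
          · subst hcp
            rw [getbang_set_self l c _ hp]
            constructor
            · exact LexLe_of_lt hc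
            · intro hpp0
              rw [getbang_set_ne l c ((pp - 1) / 2) _ (by omega) (by omega)]
              exact hLpp hpp0
          · rw [getbang_set_ne l p c _ (by omega) hcl]
            have hedge : LexLe (l[pp]!) (l[c]!) := by
              have := h1 c hc0 hcl (by omega) hcp
              rwa [hcq] at this
            constructor
            · exact LexLe_trans (LexLe_of_lt hc) hedge
            · intro hpp0
              rw [getbang_set_ne l p ((pp - 1) / 2) _ (by omega) (by omega)]
              exact LexLe_trans (hLpp hpp0) hedge
      · simp only [if_neg hc]
        intro j hj0 hjlen
        have hjl : j < l.length := by simpa using hjlen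
        by_cases hjp : j = p
        · subst hjp
          rw [getbang_set_self l j _ hp,
            getbang_set_ne l j ((j - 1) / 2) _ (by omega) (by omega)]
          exact (pvLt_false_iff _ _).1 (by simpa [hpp] using hc)
        · rw [getbang_set_ne l p j _ (by omega) hjl]
          by_cases hqp : (j - 1) / 2 = p
          · rw [hqp, getbang_set_self l p _ hp]
            exact (h2 j hj0 hjl (by omega)).1
          · rw [getbang_set_ne l p ((j - 1) / 2) _ (by omega) (by omega)]
            exact h1 j hj0 hjl hqp hjp
    · simp only [dif_neg h0]
      have hp0 : p = 0 := by omega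
      subst hp0
      intro j hj0 hjlen
      have hjl : j < l.length := by simpa using hjlen
      rw [getbang_set_ne l 0 j _ (by omega) hjl]
      by_cases hq0 : (j - 1) / 2 = 0
      · rw [hq0, getbang_set_self l 0 _ hp]
        exact (h2 j hj0 hjl hq0).1
      · rw [getbang_set_ne l 0 ((j - 1) / 2) _ (by omega) (by omega)]
        exact h1 j hj0 hjl hq0 (by omega)

theorem ms_chain {X Y Z a b c : Multiset (Int × Int)}
    (h1 : X + a = Y + b) (h2 : Y + c = Z + a) : X + c = Z + b := by
  have h : (X + c) + a = (Z + b) + a := by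
    calc (X + c) + a = (X + a) + c := by abel
    _ = (Y + b) + c := by rw [h1]
    _ = (Y + c) + b := by abel
    _ = (Z + a) + b := by rw [h2]
    _ = (Z + b) + a := by abel
  exact add_right_cancel h

-- one hole-lowering step of _siftup preserves the invariants
theorem siftup_step (l : List (Int × Int)) (p c : Nat) (hp : p < l.length)
    (hc : (c - 1) / 2 = p) (hc0 : 0 < c) (hcl : c < l.length)
    (hmin : ∀ s, 0 < s → s < l.length → (s - 1) / 2 = p → LexLe (l[c]!) (l[s]!))
    (h1 : HeapExcept l p) (h2 : ParentOK l p) :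
    HeapExcept (l.set p (l[c]!)) c ∧ ParentOK (l.set p (l[c]!)) c := by
  have hpc : p < c := by omega
  constructor
  · intro j hj0 hjl' hq hjne
    have hjl : j < l.length := by simpa using hjl'
    by_cases hjp : j = p
    · subst hjp
      rw [getbang_set_self l j _ hp,
        getbang_set_ne l j ((j - 1) / 2) _ (by omega) (by omega)]
      exact h2 c hc0 hcl hc hj0
    · rw [getbang_set_ne l p j _ (by omega) hjl]
      by_cases hqp : (j - 1) / 2 = p
      · rw [hqp, getbang_set_self l p _ hp]
        exact hmin j hj0 hjl hqp
      · rw [getbang_set_ne l p ((j - 1) / 2) _ (by omega) (by omega)]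
        exact h1 j hj0 hjl hqp hjp
  · intro c' h0' hl' hq' _
    have hcl' : c' < l.length := by simpa using hl'
    have hcp' : c' ≠ p := by omega
    rw [hc, getbang_set_self l p _ hp, getbang_set_ne l p c' _ (by omega) hcl']
    have := h1 c' h0' hcl' (by omega) hcp'
    rwa [hq'] at this

theorem siftupLoop_spec (e : Nat) : ∀ (m : Nat) (l : List (Int × Int)) (p : Nat),
    m = e - p → e = l.length →
    p < l.length → HeapExcept l p → ParentOK l p →
    (pvSiftupLoop l p e).1.length = l.length ∧ (pvSiftupLoop l p e).2 < l.length ∧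
    l.length ≤ 2 * (pvSiftupLoop l p e).2 + 1 ∧
    HeapExcept (pvSiftupLoop l p e).1 (pvSiftupLoop l p e).2 ∧
    ∀ x, (↑((pvSiftupLoop l p e).1.set (pvSiftupLoop l p e).2 x) : Multiset (Int × Int)) +
      {l[p]!} = ↑l + {x} := by
  intro m
  induction m using Nat.strong_induction_on with
  | _ m ih =>
    intro l p hm he hp h1 h2
    rw [pvSiftupLoop]
    by_cases hlt : 2 * p + 1 < e
    · simp only [dif_pos hlt]
      by_cases hb : (decide (2 * p + 1 + 1 < e) && !pvLt (l[2 * p + 1]!) (l[2 * p + 1 + 1]!)) = true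
      · simp only [if_pos hb]
        simp only [Bool.and_eq_true, decide_eq_true_eq, Bool.not_eq_true'] at hb
        obtain ⟨hr, hnlt⟩ := hb
        set c := 2 * p + 1 + 1 with hcdef
        have hcl : c < l.length := by omega
        have hmin : ∀ s, 0 < s → s < l.length → (s - 1) / 2 = p → LexLe (l[c]!) (l[s]!) := by
          intro s hs0 hsl hsq
          have : s = 2 * p + 1 ∨ s = 2 * p + 2 := by omega
          rcases this with h | h
          · subst h; exact (pvLt_false_iff _ _).1 hnlt
          · have : s = c := by omega
            subst this; exact LexLe_refl _
        obtain ⟨hs1, hs2⟩ := siftup_step l p c hp (by omega) (by omega) hcl hmin h1 h2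
        have hrec := ih (e - c) (by omega) (l.set p (l[c]!)) c (by omega)
          (by simpa using he) (by simpa using hcl) hs1 hs2
        obtain ⟨r1, r2, r3, r4, r5⟩ := hrec
        simp only [List.length_set] at r1 r2 r3
        refine ⟨r1, r2, r3, r4, ?_⟩
        intro x
        have h1' := r5 x
        rw [getbang_set_ne l p c _ (by omega) hcl] at h1'
        have h2' := set_multiset l p (l[c]!) hp
        exact ms_chain h1' h2'
      · simp only [if_neg hb]
        set c := 2 * p + 1 with hcdef
        have hcl : c < l.length := by omega
        have hmin : ∀ s, 0 < s → s < l.length → (s - 1) / 2 = p → LexLe (l[c]!) (l[s]!) := by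
          intro s hs0 hsl hsq
          have : s = 2 * p + 1 ∨ s = 2 * p + 2 := by omega
          rcases this with h | h
          · have : s = c := by omega
            subst this; exact LexLe_refl _
          · have hr : 2 * p + 1 + 1 < e := by omega
            have hseq : s = 2 * p + 1 + 1 := by omega
            subst hseq
            have hltc : pvLt (l[c]!) (l[2 * p + 1 + 1]!) = true := by
              cases hv : pvLt (l[c]!) (l[2 * p + 1 + 1]!) with
              | true => rfl
              | false =>
                exact absurd (by rw [show c + 1 = 2 * p + 1 + 1 from rfl, hv]; simp [hr]) hb
            exact LexLe_of_lt hltc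
        obtain ⟨hs1, hs2⟩ := siftup_step l p c hp (by omega) (by omega) hcl hmin h1 h2
        have hrec := ih (e - c) (by omega) (l.set p (l[c]!)) c (by omega)
          (by simpa using he) (by simpa using hcl) hs1 hs2
        obtain ⟨r1, r2, r3, r4, r5⟩ := hrec
        simp only [List.length_set] at r1 r2 r3
        refine ⟨r1, r2, r3, r4, ?_⟩
        intro x
        have h1' := r5 x
        rw [getbang_set_ne l p c _ (by omega) hcl] at h1'
        have h2' := set_multiset l p (l[c]!) hp
        exact ms_chain h1' h2'
    · rw [dif_neg hlt]
      exact ⟨rfl, hp, by omega, h1, fun x => set_multiset l p x hp⟩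

theorem getbang_append_left (l : List (Int × Int)) (x : Int × Int) (j : Nat)
    (h : j < l.length) : (l ++ [x])[j]! = l[j]! := by
  rw [getElem!_pos (l ++ [x]) j (by simp; omega), getElem!_pos l j h,
    List.getElem_append_left h]

theorem getbang_dropLast (l : List (Int × Int)) (j : Nat) (h : j < l.dropLast.length) :
    l.dropLast[j]! = l[j]! := by
  rw [getElem!_pos l.dropLast j h, getElem!_pos l j (by simp at h; omega), List.getElem_dropLast]

theorem HeapExcept_set_hole (l : List (Int × Int)) (p : Nat) (x : Int × Int)
    (h : HeapExcept l p) : HeapExcept (l.set p x) p := by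
  intro j hj0 hjl hq hjne
  have hjl' : j < l.length := by simpa using hjl
  rw [getbang_set_ne l p j _ (by omega) hjl', getbang_set_ne l p ((j - 1) / 2) _ (by omega) (by omega)]
  exact h j hj0 hjl' hq hjne

theorem heappush_multiset (l : List (Int × Int)) (item : Int × Int) :
    (↑(pvHeappush l item) : Multiset (Int × Int)) = ↑l + {item} := by
  unfold pvHeappush pvSiftdown
  have hn : (l ++ [item]).length - 1 = l.length := by simp
  have hlen : l.length < (l ++ [item]).length := by simp
  have hitem : (l ++ [item])[l.length]! = item := by
    rw [getElem!_pos (l ++ [item]) l.length hlen]; simp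
  rw [hn, hitem]
  have hms := siftdownLoop_multiset l.length (l ++ [item]) item hlen
  rw [hitem] at hms
  rw [add_right_cancel hms]
  exact (Multiset.cons_inj_right item).mp rfl

theorem heappush_heap (l : List (Int × Int)) (item : Int × Int) (h : IsHeap l) :
    IsHeap (pvHeappush l item) := by
  unfold pvHeappush pvSiftdown
  have hn : (l ++ [item]).length - 1 = l.length := by simp
  have hlen : l.length < (l ++ [item]).length := by simp
  have hitem : (l ++ [item])[l.length]! = item := by
    rw [getElem!_pos (l ++ [item]) l.length hlen]; simp
  rw [hn, hitem]
  apply siftdownLoop_heap l.length (l ++ [item]) item hlen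
  · intro j hj0 hjl hq hjne
    have hjl' : j < l.length := by simp at hjl; omega
    rw [getbang_append_left l item j hjl', getbang_append_left l item ((j - 1) / 2) (by omega)]
    exact h j hj0 hjl'
  · intro c hc0 hcl hcq
    simp at hcl
    omega

theorem heappop_fst (l : List (Int × Int)) (hne : l ≠ []) : (pvHeappop l).1 = l[0]! := by
  unfold pvHeappop
  have hl0 : 0 < l.length := List.length_pos_iff.2 hne
  by_cases hr : l.dropLast.isEmpty = true
  · have h1 : l.length = 1 := by
      have := List.isEmpty_iff.1 hr
      have := congrArg List.length this
      simp at this; omega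
    simp only [if_pos hr]
    rw [List.getLast!_eq_getElem!, h1]
  · simp only [if_neg hr]
    have hne' : l.dropLast ≠ [] := by simpa [List.isEmpty_iff] using hr
    exact getbang_dropLast l 0 (List.length_pos_iff.2 hne')

theorem coe_concat (xs : List (Int × Int)) (y : Int × Int) :
    (↑(xs ++ [y]) : Multiset (Int × Int)) = ↑xs + {y} :=
  (Multiset.cons_inj_right y).mp rfl

theorem siftup_spec (l : List (Int × Int)) (hl : 0 < l.length) (hhe : HeapExcept l 0) :
    IsHeap (pvSiftup l 0) ∧ (↑(pvSiftup l 0) : Multiset (Int × Int)) = ↑l := by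
  unfold pvSiftup
  have hpo : ParentOK l 0 := by
    intro c hc0 hcl hcq h0
    exact absurd h0 (lt_irrefl 0)
  obtain ⟨r1, r2, r3, r4, r5⟩ := siftupLoop_spec l.length l.length l 0 (by omega) rfl hl hhe hpo
  set r := pvSiftupLoop l 0 l.length with hr
  set ni := l[0]! with hni
  have hrl : r.2 < (r.1.set r.2 ni).length := by simp [List.length_set, r1]; omega
  constructor
  · apply siftdownLoop_heap r.2 (r.1.set r.2 ni) ni hrl
    · exact HeapExcept_set_hole _ _ _ r4
    · intro c hc0 hcl hcq
      exfalso
      simp only [List.length_set, r1] at hcl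
      omega
  · have hms := siftdownLoop_multiset r.2 (r.1.set r.2 ni) ni hrl
    rw [getbang_set_self r.1 r.2 ni (by omega)] at hms
    rw [add_right_cancel hms]
    exact add_right_cancel (r5 ni)

theorem pop_he (l : List (Int × Int)) (h : IsHeap l) :
    HeapExcept (l.dropLast.set 0 l.getLast!) 0 := by
  intro j hj0 hjl hq hjne
  have hjl' : j < l.dropLast.length := by simpa using hjl
  have hjll : j < l.length := by simp at hjl'; omega
  have hql : (j - 1) / 2 < l.dropLast.length := by omega
  rw [getbang_set_ne _ 0 j _ (by omega) hjl', getbang_set_ne _ 0 ((j - 1) / 2) _ (by omega) hql,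
    getbang_dropLast l j hjl', getbang_dropLast l ((j - 1) / 2) hql]
  exact h j hj0 hjll

theorem heappop_multiset (l : List (Int × Int)) (hne : l ≠ []) (h : IsHeap l) :
    (↑((pvHeappop l).2) : Multiset (Int × Int)) + {(pvHeappop l).1} = ↑l := by
  unfold pvHeappop
  have hl0 : 0 < l.length := List.length_pos_iff.2 hne
  have hgl : l.getLast hne = l.getLast! := by
    rw [List.getLast!_eq_getElem!, getElem!_pos l (l.length - 1) (by omega),
      List.getLast_eq_getElem]
  have hcat : (↑l : Multiset (Int × Int)) = ↑l.dropLast + {l.getLast!} := by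
    conv_lhs => rw [← List.dropLast_append_getLast hne]
    rw [coe_concat, hgl]
  by_cases hr : l.dropLast.isEmpty = true
  · simp only [if_pos hr]
    rw [List.isEmpty_iff.1 hr] at hcat ⊢
    simpa using hcat.symm
  · simp only [if_neg hr]
    have hne' : l.dropLast ≠ [] := by simpa [List.isEmpty_iff] using hr
    have hrl : 0 < l.dropLast.length := List.length_pos_iff.2 hne'
    obtain ⟨_, hm⟩ := siftup_spec (l.dropLast.set 0 l.getLast!) (by simpa using hrl) (pop_he l h)
    rw [hm, set_multiset l.dropLast 0 l.getLast! hrl, hcat]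

theorem heappop_heap (l : List (Int × Int)) (h : IsHeap l) : IsHeap (pvHeappop l).2 := by
  unfold pvHeappop
  by_cases hr : l.dropLast.isEmpty = true
  · simp only [if_pos hr]
    rw [List.isEmpty_iff.1 hr]
    intro j hj0 hjl
    simp at hjl
  · simp only [if_neg hr]
    have hne' : l.dropLast ≠ [] := by simpa [List.isEmpty_iff] using hr
    have hrl : 0 < l.dropLast.length := List.length_pos_iff.2 hne'
    exact (siftup_spec (l.dropLast.set 0 l.getLast!) (by simpa using hrl) (pop_he l h)).1

theorem root_min (l : List (Int × Int)) (h : IsHeap l) :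
    ∀ j : Nat, j < l.length → LexLe (l[0]!) (l[j]!) := by
  intro j
  induction j using Nat.strong_induction_on with
  | _ j ih =>
    intro hj
    rcases Nat.eq_zero_or_pos j with h0 | h0
    · subst h0; exact LexLe_refl _
    · exact LexLe_trans (ih ((j - 1) / 2) (by omega) (by omega)) (h j h0 hj)

-- the fold step of PySem.List.min2? with second key = identity
def m2step (k1 : Int → Int) (acc : Option Int) (x : Int) : Option Int :=
  match acc with
  | none => some x
  | some m =>
    if (decide (k1 x < k1 m) || !decide (k1 m < k1 x) && decide (x < m)) = true then some x
    else some m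

theorem min2_eq_foldl (k1 : Int → Int) (xs : List Int) :
    PySem.List.min2? xs k1 (fun i => i) = xs.foldl (m2step k1) none := by
  unfold PySem.List.min2?
  congr 1
  funext acc x
  cases acc <;> rfl

theorem min2_go (k1 : Int → Int) : ∀ (t : List Int) (m0 : Int),
    ∃ m, t.foldl (m2step k1) (some m0) = some m ∧ (m = m0 ∨ m ∈ t) ∧
      LexLe (k1 m, m) (k1 m0, m0) ∧ ∀ y ∈ t, LexLe (k1 m, m) (k1 y, y) := by
  intro t
  induction t with
  | nil => intro m0; exact ⟨m0, rfl, Or.inl rfl, LexLe_refl _, by simp⟩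
  | cons y rest ih =>
    intro m0
    by_cases hc : (decide (k1 y < k1 m0) || !decide (k1 m0 < k1 y) && decide (y < m0)) = true
    · obtain ⟨m, hm, hmem, hle, hall⟩ := ih y
      have hy : LexLe (k1 y, y) (k1 m0, m0) := by
        simp only [Bool.or_eq_true, Bool.and_eq_true, Bool.not_eq_true', decide_eq_true_eq,
          decide_eq_false_iff_not] at hc
        dsimp [LexLe]; omega
      refine ⟨m, ?_, ?_, LexLe_trans hle hy, ?_⟩
      · simpa [m2step, hc] using hm
      · rcases hmem with h | h
        · exact Or.inr (by simp [h])
        · exact Or.inr (by simp [h])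
      · intro z hz
        rcases List.mem_cons.1 hz with h | h
        · subst h; exact hle
        · exact hall z h
    · obtain ⟨m, hm, hmem, hle, hall⟩ := ih m0
      refine ⟨m, ?_, ?_, hle, ?_⟩
      · simpa [m2step, hc] using hm
      · rcases hmem with h | h
        · exact Or.inl h
        · exact Or.inr (by simp [h])
      · intro z hz
        rcases List.mem_cons.1 hz with h | h
        · subst h
          have hy : LexLe (k1 m0, m0) (k1 z, z) := by
            simp only [Bool.or_eq_true, Bool.and_eq_true, Bool.not_eq_true', decide_eq_true_eq,
              decide_eq_false_iff_not, not_or, not_and, not_lt] at hc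
            dsimp [LexLe]; omega
          exact LexLe_trans hle hy
        · exact hall z h

-- the min2? fold keeps an element no other element is lexicographically smaller than
theorem min2_spec (k1 : Int → Int) (x : Int) (t : List Int) :
    ∃ m, PySem.List.min2? (x :: t) k1 (fun i => i) = some m ∧ m ∈ x :: t ∧
      ∀ y ∈ x :: t, LexLe (k1 m, m) (k1 y, y) := by
  obtain ⟨m, hm, hmem, hle, hall⟩ := min2_go k1 t x
  refine ⟨m, ?_, ?_, ?_⟩
  · rw [min2_eq_foldl, List.foldl_cons]
    exact hm
  · rcases hmem with h | h
    · simp [h]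
    · simp [h]
  · intro y hy
    rcases List.mem_cons.1 hy with h | h
    · subst h; exact hle
    · exact hall y h

-- the coupling invariant between A's heap and B's running sums
def HInv (heap : List (Int × Int)) (sums : List Int) (k : Int) : Prop :=
  sums.length = k.toNat ∧ IsHeap heap ∧
  (↑heap : Multiset (Int × Int)) =
    ↑((PySem.List.pyRange 0 k 1).map (fun i => (PySem.List.pyGetD sums i 0, i)))

theorem coe_split (a b : List (Int × Int)) (x : Int × Int) :
    (↑(a ++ x :: b) : Multiset (Int × Int)) = (↑a + ↑b) + {x} := by
  calc (↑(a ++ x :: b) : Multiset (Int × Int)) = ↑a + ↑(x :: b) := (Multiset.coe_add _ _).symm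
  _ = ↑a + (x ::ₘ ↑b) := by rw [Multiset.cons_coe]
  _ = ↑a + ({x} + ↑b) := by rw [Multiset.singleton_add]
  _ = (↑a + ↑b) + {x} := by abel

theorem pvStepA_def (subl : List (List Int)) (heap : List (Int × Int)) (p : Int × Int) :
    pvStepA (subl, heap) p =
      (PySem.List.pySetD subl ((pvHeappop heap).1).2
        (PySem.List.pyGetD subl ((pvHeappop heap).1).2 [] ++ [p.1]),
       pvHeappush (pvHeappop heap).2 (((pvHeappop heap).1).1 + p.2, ((pvHeappop heap).1).2)) := rfl

theorem pvStepB_def (k : Int) (subl : List (List Int)) (sums : List Int) (p : Int × Int) :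
    pvStepB k (subl, sums) p =
      (PySem.List.pySetD subl
        ((PySem.List.min2? (PySem.List.pyRange 0 k 1)
          (fun i => PySem.List.pyGetD sums i 0) (fun i => i)).getD 0)
        (PySem.List.pyGetD subl
          ((PySem.List.min2? (PySem.List.pyRange 0 k 1)
            (fun i => PySem.List.pyGetD sums i 0) (fun i => i)).getD 0) [] ++ [p.1]),
       PySem.List.pySetD sums
        ((PySem.List.min2? (PySem.List.pyRange 0 k 1)
          (fun i => PySem.List.pyGetD sums i 0) (fun i => i)).getD 0)
        (PySem.List.pyGetD sums
          ((PySem.List.min2? (PySem.List.pyRange 0 k 1)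
            (fun i => PySem.List.pyGetD sums i 0) (fun i => i)).getD 0) 0 + p.2)) := rfl

theorem step_eq (k : Int) (hk : 1 ≤ k) (subl : List (List Int)) (heap : List (Int × Int))
    (sums : List Int) (hI : HInv heap sums k) (p : Int × Int) :
    (pvStepA (subl, heap) p).1 = (pvStepB k (subl, sums) p).1 ∧
    HInv (pvStepA (subl, heap) p).2 (pvStepB k (subl, sums) p).2 k := by
  obtain ⟨hlen, hheap, hms⟩ := hI
  have hrlen : (PySem.List.pyRange 0 k 1).length = k.toNat := by
    rw [PySem.List.length_pyRange_one]; omega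
  have hhlen : heap.length = k.toNat := by
    have := congrArg Multiset.card hms
    simpa [hrlen] using this
  have hne : heap ≠ [] := by
    intro h; rw [h] at hhlen; simp at hhlen; omega
  have hcons : PySem.List.pyRange 0 k 1 = 0 :: PySem.List.pyRange 1 k 1 := by
    have := PySem.List.pyRange_one_cons (a := 0) (b := k) (by omega)
    simpa using this
  obtain ⟨j, hjsome, hjmem, hjmin⟩ :=
    min2_spec (fun i => PySem.List.pyGetD sums i 0) 0 (PySem.List.pyRange 1 k 1)
  rw [← hcons] at hjsome hjmem hjmin
  have hj0k : 0 ≤ j ∧ j < k := PySem.List.mem_pyRange_one.1 hjmem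
  have hperm : heap.Perm ((PySem.List.pyRange 0 k 1).map
      (fun i => (PySem.List.pyGetD sums i 0, i))) := Multiset.coe_eq_coe.1 hms
  have hcs : (pvHeappop heap).1 = (PySem.List.pyGetD sums j 0, j) := by
    rw [heappop_fst heap hne]
    have h0l : 0 < heap.length := List.length_pos_iff.2 hne
    have hcsmem : heap[0]! ∈ heap := by
      rw [getElem!_pos heap 0 h0l]; exact List.getElem_mem h0l
    have hlb : ∀ y ∈ heap, LexLe (heap[0]!) y := by
      intro y hy
      obtain ⟨idx, hidx, hidxeq⟩ := List.mem_iff_getElem.1 hy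
      rw [← hidxeq, ← getElem!_pos heap idx hidx]
      exact root_min heap hheap idx hidx
    have hfjmem : (PySem.List.pyGetD sums j 0, j) ∈ heap :=
      hperm.mem_iff.2 (List.mem_map_of_mem hjmem)
    have h1 : LexLe (heap[0]!) (PySem.List.pyGetD sums j 0, j) := hlb _ hfjmem
    have hcsin : heap[0]! ∈ (PySem.List.pyRange 0 k 1).map
        (fun i => (PySem.List.pyGetD sums i 0, i)) := hperm.subset hcsmem
    obtain ⟨i, hi, hieq⟩ := List.mem_map.1 hcsin
    have h2 : LexLe (PySem.List.pyGetD sums j 0, j) (heap[0]!) := by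
      rw [← hieq]; exact hjmin i hi
    exact LexLe_antisymm h1 h2
  have hgetD : (PySem.List.min2? (PySem.List.pyRange 0 k 1)
      (fun i => PySem.List.pyGetD sums i 0) (fun i => i)).getD 0 = j := by
    rw [hjsome]; rfl
  -- split range at j
  obtain ⟨ra, rb, hsplit⟩ := List.append_of_mem hjmem
  have hnodup := PySem.List.nodup_pyRange_one 0 k
  rw [hsplit] at hnodup
  have hmid := List.nodup_middle.1 hnodup
  have hnotin : j ∉ ra ++ rb := (List.nodup_cons.1 hmid).1
  have hjra : j ∉ ra := fun h => hnotin (List.mem_append_left _ h)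
  have hjrb : j ∉ rb := fun h => hnotin (List.mem_append_right _ h)
  have hjtn : j.toNat < sums.length := by omega
  have hf'ne : ∀ i, 0 ≤ i → i ≠ j →
      PySem.List.pyGetD (PySem.List.pySetD sums j (PySem.List.pyGetD sums j 0 + p.2)) i 0 =
      PySem.List.pyGetD sums i 0 := by
    intro i hi0 hij
    have hjeq : (j.toNat : Int) = j := Int.toNat_of_nonneg hj0k.1
    have hieq : (i.toNat : Int) = i := Int.toNat_of_nonneg hi0
    rw [← hjeq, ← hieq, PySem.List.pyGetD_pySetD_natCast sums j.toNat i.toNat _ 0 hjtn,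
      if_neg (by omega)]
  have hf'j : PySem.List.pyGetD (PySem.List.pySetD sums j (PySem.List.pyGetD sums j 0 + p.2)) j 0 =
      PySem.List.pyGetD sums j 0 + p.2 := by
    have hjeq : (j.toNat : Int) = j := Int.toNat_of_nonneg hj0k.1
    rw [← hjeq, PySem.List.pyGetD_pySetD_natCast sums j.toNat j.toNat _ 0 hjtn, if_pos rfl]
  have hrabounds : ∀ i ∈ ra, 0 ≤ i ∧ i ≠ j := by
    intro i hi
    have : i ∈ PySem.List.pyRange 0 k 1 := by rw [hsplit]; exact List.mem_append_left _ hi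
    exact ⟨(PySem.List.mem_pyRange_one.1 this).1, fun h => hjra (h ▸ hi)⟩
  have hrbbounds : ∀ i ∈ rb, 0 ≤ i ∧ i ≠ j := by
    intro i hi
    have : i ∈ PySem.List.pyRange 0 k 1 := by
      rw [hsplit]; exact List.mem_append_right _ (List.mem_cons_of_mem _ hi)
    exact ⟨(PySem.List.mem_pyRange_one.1 this).1, fun h => hjrb (h ▸ hi)⟩
  constructor
  · simp only [pvStepA_def, pvStepB_def, hcs, hgetD]
  · refine ⟨?_, ?_, ?_⟩
    · simp only [pvStepB_def, hgetD]
      rw [PySem.List.pySetD_of_nonneg sums _ hj0k.1, List.length_set]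
      exact hlen
    · simp only [pvStepA_def]
      exact heappush_heap _ _ (heappop_heap heap hheap)
    · simp only [pvStepA_def, pvStepB_def, hcs, hgetD]
      rw [heappush_multiset]
      have hpop := heappop_multiset heap hne hheap
      rw [hcs, hms, hsplit, List.map_append, List.map_cons, coe_split] at hpop
      have hres := add_right_cancel hpop
      rw [hsplit, List.map_append, List.map_cons, coe_split, hf'j]
      have hmra : ra.map (fun i =>
          (PySem.List.pyGetD (PySem.List.pySetD sums j (PySem.List.pyGetD sums j 0 + p.2)) i 0, i)) =
          ra.map (fun i => (PySem.List.pyGetD sums i 0, i)) :=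
        List.map_congr_left (fun i hi => by
          rw [hf'ne i (hrabounds i hi).1 (hrabounds i hi).2])
      have hmrb : rb.map (fun i =>
          (PySem.List.pyGetD (PySem.List.pySetD sums j (PySem.List.pyGetD sums j 0 + p.2)) i 0, i)) =
          rb.map (fun i => (PySem.List.pyGetD sums i 0, i)) :=
        List.map_congr_left (fun i hi => by
          rw [hf'ne i (hrbbounds i hi).1 (hrbbounds i hi).2])
      rw [hmra, hmrb, hres]

theorem loop_eq (k : Int) (hk : 1 ≤ k) : ∀ (lst : List (Int × Int)) (subl : List (List Int))
    (heap : List (Int × Int)) (sums : List Int), HInv heap sums k →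
    (lst.foldl pvStepA (subl, heap)).1 = (lst.foldl (pvStepB k) (subl, sums)).1 := by
  intro lst
  induction lst with
  | nil => intro subl heap sums _; rfl
  | cons p rest ih =>
    intro subl heap sums hI
    obtain ⟨h1, h2⟩ := step_eq k hk subl heap sums hI p
    simp only [List.foldl_cons]
    have hA : pvStepA (subl, heap) p = ((pvStepA (subl, heap) p).1, (pvStepA (subl, heap) p).2) := rfl
    have hB : pvStepB k (subl, sums) p = ((pvStepB k (subl, sums) p).1, (pvStepB k (subl, sums) p).2) := rfl
    rw [hA, hB, h1]
    exact ih _ _ _ h2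

theorem init_inv (k : Int) :
    HInv ((PySem.List.pyRange 0 k 1).map (fun i => ((0 : Int), i))) (List.replicate k.toNat 0) k := by
  refine ⟨by simp, ?_, ?_⟩
  · intro j hj0 hjl
    have hjl' : j < (PySem.List.pyRange 0 k 1).length := by simpa using hjl
    have hql : (j - 1) / 2 < (PySem.List.pyRange 0 k 1).length := by omega
    rw [getElem!_pos ((PySem.List.pyRange 0 k 1).map (fun i => ((0 : Int), i))) j hjl,
      getElem!_pos ((PySem.List.pyRange 0 k 1).map (fun i => ((0 : Int), i))) ((j - 1) / 2)
        (by simpa using hql)]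
    simp only [List.getElem_map, PySem.List.getElem_pyRange_one]
    dsimp [LexLe]
    omega
  · congr 1
    apply List.map_congr_left
    intro i hi
    obtain ⟨hi0, hik⟩ := PySem.List.mem_pyRange_one.1 hi
    rw [PySem.List.pyGetD_eq_getElem _ _ hi0 (by simp; omega)]
    simp

-- ===== VERDICT (by name: the statement is the Claim_ definition above) =====
theorem approx_unordered_py_spec : Claim_equal_approx_unordered_py := by
  unfold Claim_equal_approx_unordered_py
  intro arr k _hDom hPre
  unfold Spec_approx_unordered_py
  rcases hPre with hnil | hk
  · subst hnil
    unfold approx_unordered_py approx_unordered_py_alt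
    have h2 : PySem.List.sorted (PySem.List.enumerate ([] : List Int)) (fun x => -x.2) = [] := by
      have hp := PySem.List.sorted_perm (PySem.List.enumerate ([] : List Int))
        (fun x : Int × Int => -x.2) false
      exact hp.eq_nil
    rw [h2]
    rfl
  · unfold approx_unordered_py approx_unordered_py_alt
    exact loop_eq k hk _ _ _ _ (init_inv k)
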